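-- pv_equiv track=rewrite | github.com/DeepakEz/MCN | compare_routers_report.py | per_tribe
-- ===== SOURCE A (Python) =====
-- N_ARMS = 3
--
-- def per_tribe(recs):
--     return {
--         i: {
--             "count": sum(1 for r in recs if int(r.get("tribe_idx", 0)) == i),
--             "pass":  sum(1 for r in recs if int(r.get("tribe_idx", 0)) == i and r.get("verdict") == "PASS"),
--         }
--         for i in range(N_ARMS)
--     }
-- ===== SOURCE B (Python) =====
-- N_ARMS = 3
--
-- def per_tribe(recs):
--     counts = [0] * N_ARMS
--     passes = [0] * N_ARMS
--     for r in recs: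
--         idx = int(r.get("tribe_idx", 0))
--         if 0 <= idx < N_ARMS:
--             counts[idx] += 1
--             if r.get("verdict") == "PASS":
--                 passes[idx] += 1
--     return {i: {"count": counts[i], "pass": passes[i]} for i in range(N_ARMS)}
-- ===== Notes on version B (the rewrite author's own statement) =====
-- stated objective: alternative
-- what changed: Replaces the 2*N_ARMS independent generator scans of recs (one per dict entry) by a single accumulating pass that bumps per-tribe count/pass counters, then assembles the dict once.
import Mathlib
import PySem

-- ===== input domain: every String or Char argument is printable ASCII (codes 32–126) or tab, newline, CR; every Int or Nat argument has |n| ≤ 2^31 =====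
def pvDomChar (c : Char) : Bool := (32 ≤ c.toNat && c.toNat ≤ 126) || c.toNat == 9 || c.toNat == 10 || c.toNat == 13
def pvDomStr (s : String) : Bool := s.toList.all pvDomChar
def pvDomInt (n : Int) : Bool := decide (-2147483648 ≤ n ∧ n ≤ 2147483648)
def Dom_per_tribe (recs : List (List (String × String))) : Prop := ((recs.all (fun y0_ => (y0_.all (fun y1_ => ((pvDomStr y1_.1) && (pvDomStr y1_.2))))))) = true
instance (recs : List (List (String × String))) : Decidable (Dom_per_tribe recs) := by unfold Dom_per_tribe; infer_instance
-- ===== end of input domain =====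

-- B replaces A's 2*N_ARMS independent scans of recs by one accumulating pass over recs (objective: alternative single-pass algorithm).

-- shared helper: int(r.get("tribe_idx", 0)); Pre_ guarantees int() does not raise, so getD 0 is never the value Python would lack
def pvTribeIdx (r : List (String × String)) : Int :=
  match (PySem.Dict.mk r).get? "tribe_idx" with
  | none => 0
  | some v => (PySem.Int.ofStr? v).getD 0

-- shared helper: r.get("verdict") == "PASS" (missing key gives None ≠ "PASS")
def pvVerdictPass (r : List (String × String)) : Bool :=
  (PySem.Dict.mk r).get? "verdict" == some "PASS"

-- ===== PORT A =====
-- sum(1 for r in recs if int(r.get("tribe_idx", 0)) == i)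
def pvCount (recs : List (List (String × String))) (i : Int) : Int :=
  recs.foldl (fun s r => if pvTribeIdx r == i then s + 1 else s) 0

-- sum(1 for r in recs if int(r.get("tribe_idx", 0)) == i and r.get("verdict") == "PASS")
def pvPassCount (recs : List (List (String × String))) (i : Int) : Int :=
  recs.foldl (fun s r => if pvTribeIdx r == i && pvVerdictPass r then s + 1 else s) 0

def per_tribe (recs : List (List (String × String))) : List (Int × List (String × Int)) :=
  (PySem.List.pyRange 0 3 1).map (fun i =>
    (i, [("count", pvCount recs i), ("pass", pvPassCount recs i)]))

-- ===== PORT B =====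
-- one loop iteration of B: bump counts[idx] (and passes[idx] on a PASS verdict) when 0 <= idx < N_ARMS
def pvStepB (st : List Int × List Int) (r : List (String × String)) : List Int × List Int :=
  let idx := pvTribeIdx r
  if 0 ≤ idx ∧ idx < 3 then
    let counts := st.1.set idx.toNat (st.1.getD idx.toNat 0 + 1)
    let passes := if pvVerdictPass r then st.2.set idx.toNat (st.2.getD idx.toNat 0 + 1) else st.2
    (counts, passes)
  else st

def per_tribe_alt (recs : List (List (String × String))) : List (Int × List (String × Int)) :=
  let st := recs.foldl pvStepB ([0, 0, 0], [0, 0, 0])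
  (PySem.List.pyRange 0 3 1).map (fun i =>
    (i, [("count", st.1.getD i.toNat 0), ("pass", st.2.getD i.toNat 0)]))

-- ===== PRECONDITION & SPEC =====
-- Pre_ excludes exactly the records whose "tribe_idx" value is not a valid int literal: there Python's int() raises ValueError in both A and B.
def Pre_per_tribe (recs : List (List (String × String))) : Prop :=
  ∀ r ∈ recs, ((PySem.Dict.mk r).get? "tribe_idx").all (fun v => (PySem.Int.ofStr? v).isSome) = true
instance (recs : List (List (String × String))) : Decidable (Pre_per_tribe recs) := by unfold Pre_per_tribe; infer_instance

def pvWitness_per_tribe : (List (List (String × String))) :=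
  [[("tribe_idx", "1"), ("verdict", "PASS")], [("verdict", "FAIL")]]

def Spec_per_tribe (recs : List (List (String × String))) (out : List (Int × List (String × Int))) : Prop := out = per_tribe_alt recs
instance (recs : List (List (String × String))) (out : List (Int × List (String × Int))) : Decidable (Spec_per_tribe recs out) := by unfold Spec_per_tribe; infer_instance

-- ===== CLAIM (what is proved, stated in full; the proofs are below) =====
def Claim_equal_per_tribe : Prop := ∀ (recs : List (List (String × String))), Dom_per_tribe recs → Pre_per_tribe recs → Spec_per_tribe recs (per_tribe recs)

-- ===== LEMMAS AND PROOFS =====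

-- a counting foldl started at s is s plus the count from 0
theorem pv_count_shift {α : Type} (P : α → Bool) (l : List α) (s : Int) :
    l.foldl (fun a r => if P r then a + 1 else a) s
      = s + l.foldl (fun a r => if P r then a + 1 else a) 0 := by
  induction l generalizing s with
  | nil => simp
  | cons r rs ih =>
      simp only [List.foldl_cons]
      rw [ih, ih (if P r then 0 + 1 else 0)]
      split_ifs <;> ring

theorem pvCount_cons (r : List (String × String)) (rs : List (List (String × String))) (i : Int) :
    pvCount (r :: rs) i = (if pvTribeIdx r == i then (1 : Int) else 0) + pvCount rs i := by
  simp only [pvCount, List.foldl_cons]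
  rw [pv_count_shift]
  split_ifs <;> simp

theorem pvPassCount_cons (r : List (String × String)) (rs : List (List (String × String))) (i : Int) :
    pvPassCount (r :: rs) i = (if pvTribeIdx r == i && pvVerdictPass r then (1 : Int) else 0) + pvPassCount rs i := by
  simp only [pvPassCount, List.foldl_cons]
  rw [pv_count_shift]
  split_ifs <;> simp

-- the single pass accumulates exactly A's per-index counts on top of any start state
theorem pv_fold_invariant (recs : List (List (String × String))) :
    ∀ c0 c1 c2 p0 p1 p2 : Int,
      recs.foldl pvStepB ([c0, c1, c2], [p0, p1, p2])
        = ([c0 + pvCount recs 0, c1 + pvCount recs 1, c2 + pvCount recs 2],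
           [p0 + pvPassCount recs 0, p1 + pvPassCount recs 1, p2 + pvPassCount recs 2]) := by
  induction recs with
  | nil => intro c0 c1 c2 p0 p1 p2; simp [pvCount, pvPassCount]
  | cons r rs ih =>
      intro c0 c1 c2 p0 p1 p2
      simp only [List.foldl_cons]
      rcases h3 : decide (0 ≤ pvTribeIdx r ∧ pvTribeIdx r < 3) with _ | _
      · -- index out of range: step is identity, r counts for no i ∈ {0,1,2}
        have hcond : ¬ (0 ≤ pvTribeIdx r ∧ pvTribeIdx r < 3) := of_decide_eq_false h3
        have hstep : pvStepB ([c0, c1, c2], [p0, p1, p2]) r = ([c0, c1, c2], [p0, p1, p2]) := by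
          simp [pvStepB, hcond]
        rw [hstep, ih]
        have e0 : (pvTribeIdx r == (0 : Int)) = false := by
          rw [beq_eq_false_iff_ne]; omega
        have e1 : (pvTribeIdx r == (1 : Int)) = false := by
          rw [beq_eq_false_iff_ne]; omega
        have e2 : (pvTribeIdx r == (2 : Int)) = false := by
          rw [beq_eq_false_iff_ne]; omega
        simp [pvCount_cons, pvPassCount_cons, e0, e1, e2]
      · have hcond : 0 ≤ pvTribeIdx r ∧ pvTribeIdx r < 3 := of_decide_eq_true h3
        have hidx : pvTribeIdx r = 0 ∨ pvTribeIdx r = 1 ∨ pvTribeIdx r = 2 := by omega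
        rcases hv : pvVerdictPass r with _ | _ <;> rcases hidx with h | h | h <;>
          simp only [pvStepB, h, hv, show (2 : Int).toNat = 2 from rfl] <;>
          norm_num <;> rw [ih] <;>
          simp [pvCount_cons, pvPassCount_cons, h, hv] <;>
          first
          | done
          | omega

theorem per_tribe_spec : Claim_equal_per_tribe := by
  intro recs _ _
  unfold Spec_per_tribe per_tribe per_tribe_alt
  rw [show PySem.List.pyRange 0 3 1 = [0, 1, 2] from rfl]
  rw [pv_fold_invariant recs 0 0 0 0 0 0]
  simp
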